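-- pv_equiv track=rewrite | github.com/Modilay/STS_Draw | sts_draw/stroke_planner.py | _remove_small_components
-- ===== SOURCE A (Python) =====
-- Point = tuple[int, int]
--
-- def _remove_small_components(matrix: list[list[int]], min_pixels: int) -> list[list[int]]:
--     if min_pixels <= 1:
--         return [row[:] for row in matrix]
--
--     rows = len(matrix)
--     cols = len(matrix[0])
--     kept = [[0 for _ in range(cols)] for _ in range(rows)]
--     seen: set[Point] = set()
--
--     for row_index in range(rows):
--         for col_index in range(cols):
--             point = (col_index, row_index)
--             if matrix[row_index][col_index] != 1 or point in seen:
--                 continue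
--             component = _collect_component(matrix, point, seen)
--             if len(component) < min_pixels:
--                 continue
--             for component_col, component_row in component:
--                 kept[component_row][component_col] = 1
--
--     return kept
--
-- def _collect_component(matrix: list[list[int]], start: Point, seen: set[Point]) -> list[Point]:
--     rows = len(matrix)
--     cols = len(matrix[0])
--     stack = [start]
--     component: list[Point] = []
--
--     while stack:
--         col_index, row_index = stack.pop()
--         if (col_index, row_index) in seen:
--             continue
--         seen.add((col_index, row_index))
--         if matrix[row_index][col_index] != 1:
--             continue
--         component.append((col_index, row_index))
--         for next_col, next_row in _neighbors((col_index, row_index), cols, rows):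
--             if matrix[next_row][next_col] == 1 and (next_col, next_row) not in seen:
--                 stack.append((next_col, next_row))
--
--     return component
--
-- def _neighbors(point: Point, cols: int, rows: int) -> list[Point]:
--     col_index, row_index = point
--     neighbors: list[Point] = []
--     for row_offset in (-1, 0, 1):
--         for col_offset in (-1, 0, 1):
--             if row_offset == 0 and col_offset == 0:
--                 continue
--             next_col = col_index + col_offset
--             next_row = row_index + row_offset
--             if 0 <= next_col < cols and 0 <= next_row < rows:
--                 neighbors.append((next_col, next_row))
--     return neighbors
-- ===== SOURCE B (Python) =====
-- def _remove_small_components(matrix: list[list[int]], min_pixels: int) -> list[list[int]]: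
--     if min_pixels <= 1:
--         return [row[:] for row in matrix]
--
--     rows = len(matrix)
--     cols = len(matrix[0])
--
--     def one(c: int, r: int) -> bool:
--         return 0 <= c < cols and 0 <= r < rows and matrix[r][c] == 1
--
--     def grow(comp: set) -> set:
--         grown = set(comp)
--         for (c, r) in comp:
--             for dr in (-1, 0, 1):
--                 for dc in (-1, 0, 1):
--                     if one(c + dc, r + dr):
--                         grown.add((c + dc, r + dr))
--         return grown
--
--     sizes: dict[tuple[int, int], int] = {}
--     out = []
--     for r in range(rows):
--         out_row = []
--         for c in range(cols):
--             if matrix[r][c] != 1: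
--                 out_row.append(0)
--             else:
--                 if (c, r) not in sizes:
--                     comp = {(c, r)}
--                     for _ in range(rows * cols):
--                         grown = grow(comp)
--                         if len(grown) == len(comp):
--                             break
--                         comp = grown
--                     for q in comp:
--                         sizes[q] = len(comp)
--                 out_row.append(1 if sizes[(c, r)] >= min_pixels else 0)
--         out.append(out_row)
--     return out
-- ===== Notes on version B (the rewrite author's own statement) =====
-- stated objective: alternative
-- what changed: Replaces the shared-seen explicit-stack DFS that collects whole components during the scan and mutates a pre-allocated kept grid by a per-cell fixpoint saturation (grow the component set by all 8-neighbours until it stops growing) with a size memo keyed by cell, building the output grid directly by comprehension.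
import Mathlib
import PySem

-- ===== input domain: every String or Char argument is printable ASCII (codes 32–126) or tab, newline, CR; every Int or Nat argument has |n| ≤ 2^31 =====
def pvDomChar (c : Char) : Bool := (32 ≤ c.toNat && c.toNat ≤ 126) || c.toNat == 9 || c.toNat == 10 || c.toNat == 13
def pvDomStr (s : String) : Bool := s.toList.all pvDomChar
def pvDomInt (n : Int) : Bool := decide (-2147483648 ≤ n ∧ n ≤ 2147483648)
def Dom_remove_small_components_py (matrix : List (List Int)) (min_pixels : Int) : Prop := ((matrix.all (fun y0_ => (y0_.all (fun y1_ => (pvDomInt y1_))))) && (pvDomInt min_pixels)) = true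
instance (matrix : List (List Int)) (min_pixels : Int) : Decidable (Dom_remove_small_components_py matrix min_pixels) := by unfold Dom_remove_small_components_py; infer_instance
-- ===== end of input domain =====

-- B replaces A's shared-seen stack DFS + kept-grid mutation by per-cell fixpoint saturation with a
-- size memo; equal return value on Pre_ (alternative structure, no speed claim).

-- ===== PORT A =====

-- matrix[r][c]: exact for the indices both programs use (guarded 0 ≤ c < cols, 0 ≤ r < rows, row length ≥ cols under Pre_)
def pvCell (matrix : List (List Int)) (c r : Int) : Int :=
  PySem.List.pyGetD (PySem.List.pyGetD matrix r []) c 0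

-- _neighbors(point, cols, rows)
def pvNeighbors (p : Int × Int) (cols rows : Int) : List (Int × Int) :=
  [(-1 : Int), 0, 1].foldl (fun acc ro =>
    [(-1 : Int), 0, 1].foldl (fun acc co =>
      if ro = 0 ∧ co = 0 then acc
      else
        let nc := p.1 + co
        let nr := p.2 + ro
        if 0 ≤ nc ∧ nc < cols ∧ 0 ≤ nr ∧ nr < rows then acc ++ [(nc, nr)] else acc) acc) []

-- the while-loop of _collect_component; the Python stack's top is the list HEAD here
-- (stack.append → cons, stack.pop → head); fuel only makes the loop total (proved sufficient below)
def pvCollectLoop (matrix : List (List Int)) (cols rows : Int) :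
    Nat → List (Int × Int) → PySem.Set (Int × Int) → List (Int × Int) →
    List (Int × Int) × PySem.Set (Int × Int)
  | 0, _, seen, comp => (comp, seen)
  | fuel + 1, stack, seen, comp =>
    match stack with
    | [] => (comp, seen)
    | p :: rest =>
      if PySem.Set.contains seen p then
        pvCollectLoop matrix cols rows fuel rest seen comp
      else
        let seen1 := PySem.Set.add seen p
        if pvCell matrix p.1 p.2 ≠ 1 then
          pvCollectLoop matrix cols rows fuel rest seen1 comp
        else
          let comp1 := comp ++ [p]
          let stack1 := (pvNeighbors p cols rows).foldl
            (fun st q =>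
              if pvCell matrix q.1 q.2 = 1 ∧ ¬ PySem.Set.contains seen1 q then q :: st else st)
            rest
          pvCollectLoop matrix cols rows fuel stack1 seen1 comp1

-- _collect_component(matrix, start, seen)
def pvCollect (matrix : List (List Int)) (start : Int × Int) (seen : PySem.Set (Int × Int)) :
    List (Int × Int) × PySem.Set (Int × Int) :=
  let rows := (matrix.length : Int)
  let cols := (matrix.headI.length : Int)
  pvCollectLoop matrix cols rows (10 * (matrix.length * matrix.headI.length) + 2) [start] seen []

-- kept[component_row][component_col] = 1
def pvSetKept (kept : List (List Int)) (c r : Int) : List (List Int) :=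
  PySem.List.pySetD kept r (PySem.List.pySetD (PySem.List.pyGetD kept r []) c 1)

def remove_small_components_py (matrix : List (List Int)) (min_pixels : Int) : List (List Int) :=
  if min_pixels ≤ 1 then matrix.map (fun row => row.take row.length)
  else
    let rows := (matrix.length : Int)
    let cols := (matrix.headI.length : Int)
    let kept0 := (List.range matrix.length).map (fun _ =>
      (List.range matrix.headI.length).map (fun _ => (0 : Int)))
    let res := (PySem.List.pyRange 0 rows 1).foldl
      (fun (st : List (List Int) × PySem.Set (Int × Int)) ri =>
        (PySem.List.pyRange 0 cols 1).foldl
          (fun (st : List (List Int) × PySem.Set (Int × Int)) ci =>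
            if pvCell matrix ci ri ≠ 1 ∨ PySem.Set.contains st.2 (ci, ri) then st
            else
              let cr := pvCollect matrix (ci, ri) st.2
              if (cr.1.length : Int) < min_pixels then (st.1, cr.2)
              else (cr.1.foldl (fun k q => pvSetKept k q.1 q.2) st.1, cr.2))
          st)
      (kept0, ([] : PySem.Set (Int × Int)))
    res.1

-- ===== PORT B =====

-- one(c, r) of Source B
def pvOne (matrix : List (List Int)) (cols rows : Int) (c r : Int) : Bool :=
  decide (0 ≤ c) && decide (c < cols) && decide (0 ≤ r) && decide (r < rows) &&
    (pvCell matrix c r == 1)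

-- grow(comp) of Source B
def pvGrow (matrix : List (List Int)) (cols rows : Int) (comp : PySem.Set (Int × Int)) :
    PySem.Set (Int × Int) :=
  comp.foldl (fun grown p =>
    [(-1 : Int), 0, 1].foldl (fun grown dr =>
      [(-1 : Int), 0, 1].foldl (fun grown dc =>
        if pvOne matrix cols rows (p.1 + dc) (p.2 + dr) then
          PySem.Set.add grown (p.1 + dc, p.2 + dr)
        else grown)
        grown)
      grown) comp

-- the bounded grow-until-fixed loop of Source B (break when the set stops growing)
def pvSaturate (matrix : List (List Int)) (cols rows : Int) :
    Nat → PySem.Set (Int × Int) → PySem.Set (Int × Int)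
  | 0, comp => comp
  | fuel + 1, comp =>
    let grown := pvGrow matrix cols rows comp
    if grown.length = comp.length then comp
    else pvSaturate matrix cols rows fuel grown

def remove_small_components_py_alt (matrix : List (List Int)) (min_pixels : Int) : List (List Int) :=
  if min_pixels ≤ 1 then matrix.map (fun row => row.take row.length)
  else
    let rows := (matrix.length : Int)
    let cols := (matrix.headI.length : Int)
    let n := matrix.length * matrix.headI.length
    ((PySem.List.pyRange 0 rows 1).foldl
      (fun (st : List (List Int) × PySem.Dict (Int × Int) Int) r =>
        let inner := (PySem.List.pyRange 0 cols 1).foldl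
          (fun (st2 : List Int × PySem.Dict (Int × Int) Int) c =>
            if pvCell matrix c r ≠ 1 then (st2.1 ++ [(0 : Int)], st2.2)
            else
              let sizes :=
                if st2.2.contains (c, r) then st2.2
                else
                  let comp := pvSaturate matrix cols rows n (PySem.Set.ofList [(c, r)])
                  comp.foldl (fun d q => d.insert q (comp.length : Int)) st2.2
              (st2.1 ++ [if min_pixels ≤ sizes.getD (c, r) 0 then (1 : Int) else 0], sizes))
          (([] : List Int), st.2)
        (st.1 ++ [inner.1], inner.2))
      (([] : List (List Int)), PySem.Dict.empty)).1

-- ===== PRECONDITION & SPEC =====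

-- Pre_ excludes exactly the inputs where A raises: with min_pixels > 1 A reads matrix[0]
-- (IndexError on an empty matrix) and every cell matrix[r][c] for c < len(matrix[0])
-- (IndexError when some row is shorter than row 0).
def Pre_remove_small_components_py (matrix : List (List Int)) (min_pixels : Int) : Prop :=
  min_pixels ≤ 1 ∨ (matrix ≠ [] ∧ ∀ row ∈ matrix, matrix.headI.length ≤ row.length)

instance (matrix : List (List Int)) (min_pixels : Int) :
    Decidable (Pre_remove_small_components_py matrix min_pixels) := by
  unfold Pre_remove_small_components_py; infer_instance

def pvWitness_remove_small_components_py : List (List Int) × Int :=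
  ([[1, 1, 0], [0, 1, 0], [0, 0, 1]], 2)

def Spec_remove_small_components_py (matrix : List (List Int)) (min_pixels : Int) (out : List (List Int)) : Prop := out = remove_small_components_py_alt matrix min_pixels
instance (matrix : List (List Int)) (min_pixels : Int) (out : List (List Int)) : Decidable (Spec_remove_small_components_py matrix min_pixels out) := by unfold Spec_remove_small_components_py; infer_instance

-- ===== CLAIM (what is proved, stated in full; the proofs are below) =====
def Claim_equal_remove_small_components_py : Prop := ∀ (matrix : List (List Int)) (min_pixels : Int), Dom_remove_small_components_py matrix min_pixels → Pre_remove_small_components_py matrix min_pixels → Spec_remove_small_components_py matrix min_pixels (remove_small_components_py matrix min_pixels)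

-- ===== LEMMAS AND PROOFS =====

-- ---- shared abstractions (proof-side only) ----

def pvColsZ (m : List (List Int)) : Int := (m.headI.length : Int)
def pvRowsZ (m : List (List Int)) : Int := (m.length : Int)

def pvOneB (m : List (List Int)) (p : Int × Int) : Bool :=
  pvOne m (pvColsZ m) (pvRowsZ m) p.1 p.2

def pvNear (p q : Int × Int) : Prop :=
  q.1 - p.1 ≤ 1 ∧ -1 ≤ q.1 - p.1 ∧ q.2 - p.2 ≤ 1 ∧ -1 ≤ q.2 - p.2

-- 8-adjacency between two foreground cells (reflexive by design; harmless for reachability)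
def pvAdj (m : List (List Int)) (p q : Int × Int) : Prop :=
  pvOneB m p = true ∧ pvOneB m q = true ∧ pvNear p q

def pvReach (m : List (List Int)) : Int × Int → Int × Int → Prop :=
  Relation.ReflTransGen (pvAdj m)

-- the component list B computes for a cell
def pvCompList (m : List (List Int)) (p : Int × Int) : List (Int × Int) :=
  pvSaturate m (pvColsZ m) (pvRowsZ m) (m.length * m.headI.length) (PySem.Set.ofList [p])

def pvCsize (m : List (List Int)) (p : Int × Int) : Nat := (pvCompList m p).length

-- all grid cells, as (col, row)
def pvCellsL (m : List (List Int)) : List (Int × Int) :=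
  ((List.range m.length) ×ˢ (List.range m.headI.length)).map (fun rc => ((rc.2 : Int), (rc.1 : Int)))

def pvCnt (m : List (List Int)) (seen : List (Int × Int)) : Nat :=
  (pvCellsL m).countP (fun q => pvOneB m q && !(decide (q ∈ seen)))

def pvRender (m : List (List Int)) (P : Int × Int → Bool) : List (List Int) :=
  (List.range m.length).map (fun (r : Nat) =>
    (List.range m.headI.length).map (fun (c : Nat) => if P ((c : Int), (r : Int)) then (1 : Int) else 0))

def pvSpecP (m : List (List Int)) (mp : Int) (q : Int × Int) : Bool :=
  pvOneB m q && decide (mp ≤ (pvCsize m q : Int))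

-- ---- generic fold lemmas ----

theorem pvFoldMemChain {α β : Type} (F : List α → β → List α) (C : β → α → Prop)
    (h : ∀ acc b x, x ∈ F acc b ↔ x ∈ acc ∨ C b x) :
    ∀ (l : List β) (acc : List α) (x : α),
      x ∈ l.foldl F acc ↔ x ∈ acc ∨ ∃ b ∈ l, C b x := by
  intro l
  induction l with
  | nil => simp
  | cons b t ih =>
    intro acc x
    simp only [List.foldl_cons, ih, h, List.mem_cons]
    constructor
    · rintro ((hx | hx) | ⟨b', hb', hc⟩)
      · exact Or.inl hx
      · exact Or.inr ⟨b, Or.inl rfl, hx⟩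
      · exact Or.inr ⟨b', Or.inr hb', hc⟩
    · rintro (hx | ⟨b', hb' | hb', hc⟩)
      · exact Or.inl (Or.inl hx)
      · exact Or.inl (Or.inr (hb' ▸ hc))
      · exact Or.inr ⟨b', hb', hc⟩

theorem pvFoldNodup {α β : Type} (F : List α → β → List α)
    (h : ∀ acc b, acc.Nodup → (F acc b).Nodup) :
    ∀ (l : List β) (acc : List α), acc.Nodup → (l.foldl F acc).Nodup := by
  intro l
  induction l with
  | nil => intro acc hacc; simpa using hacc
  | cons b t ih => intro acc hacc; exact ih _ (h _ _ hacc)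

theorem pvFoldLen {α β : Type} (F : List α → β → List α) (k : Nat)
    (h : ∀ acc b, (F acc b).length ≤ acc.length + k) :
    ∀ (l : List β) (acc : List α), (l.foldl F acc).length ≤ acc.length + k * l.length := by
  intro l
  induction l with
  | nil => simp
  | cons b t ih =>
    intro acc
    have h1 : (t.foldl F (F acc b)).length ≤ (F acc b).length + k * t.length := ih _
    have h2 := h acc b
    simp only [List.foldl_cons, List.length_cons]
    calc (t.foldl F (F acc b)).length ≤ (F acc b).length + k * t.length := h1
      _ ≤ acc.length + k * (t.length + 1) := by have := h acc b; ring_nf; omega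

-- ---- grow / saturate characterization (B side) ----

theorem pvGrow_mem (m : List (List Int)) (cols rows : Int) (S : PySem.Set (Int × Int))
    (q : Int × Int) :
    q ∈ pvGrow m cols rows S ↔
      q ∈ S ∨ ∃ p ∈ S, pvOne m cols rows q.1 q.2 = true ∧ pvNear p q := by
  have hinner : ∀ (p : Int × Int) (dr : Int) (g : PySem.Set (Int × Int)) (x : Int × Int),
      x ∈ ([(-1 : Int), 0, 1].foldl (fun grown dc =>
            if pvOne m cols rows (p.1 + dc) (p.2 + dr) then
              PySem.Set.add grown (p.1 + dc, p.2 + dr)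
            else grown) g) ↔
        x ∈ g ∨ ∃ dc ∈ [(-1 : Int), 0, 1],
          pvOne m cols rows (p.1 + dc) (p.2 + dr) = true ∧ x = (p.1 + dc, p.2 + dr) := by
    intro p dr g x
    refine pvFoldMemChain _ (fun dc x =>
      pvOne m cols rows (p.1 + dc) (p.2 + dr) = true ∧ x = (p.1 + dc, p.2 + dr)) ?_ _ g x
    intro acc b x
    by_cases h : pvOne m cols rows (p.1 + b) (p.2 + dr) = true
    · simp [h, PySem.Set.mem_add]
    · simp [h]
  have hmid : ∀ (p : Int × Int) (g : PySem.Set (Int × Int)) (x : Int × Int),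
      x ∈ ([(-1 : Int), 0, 1].foldl (fun grown dr =>
            [(-1 : Int), 0, 1].foldl (fun grown dc =>
              if pvOne m cols rows (p.1 + dc) (p.2 + dr) then
                PySem.Set.add grown (p.1 + dc, p.2 + dr)
              else grown) grown) g) ↔
        x ∈ g ∨ ∃ dr ∈ [(-1 : Int), 0, 1], ∃ dc ∈ [(-1 : Int), 0, 1],
          pvOne m cols rows (p.1 + dc) (p.2 + dr) = true ∧ x = (p.1 + dc, p.2 + dr) := by
    intro p g x
    exact pvFoldMemChain _ (fun dr x => ∃ dc ∈ [(-1 : Int), 0, 1],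
      pvOne m cols rows (p.1 + dc) (p.2 + dr) = true ∧ x = (p.1 + dc, p.2 + dr))
      (fun acc b x => hinner p b acc x) _ g x
  have houter : q ∈ pvGrow m cols rows S ↔
      q ∈ S ∨ ∃ p ∈ S, ∃ dr ∈ [(-1 : Int), 0, 1], ∃ dc ∈ [(-1 : Int), 0, 1],
        pvOne m cols rows (p.1 + dc) (p.2 + dr) = true ∧ q = (p.1 + dc, p.2 + dr) := by
    unfold pvGrow
    exact pvFoldMemChain _ (fun p x => ∃ dr ∈ [(-1 : Int), 0, 1], ∃ dc ∈ [(-1 : Int), 0, 1],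
      pvOne m cols rows (p.1 + dc) (p.2 + dr) = true ∧ x = (p.1 + dc, p.2 + dr))
      (fun acc b x => hmid b acc x) _ S q
  rw [houter]
  apply or_congr Iff.rfl
  apply exists_congr; intro p
  apply and_congr Iff.rfl
  constructor
  · rintro ⟨dr, hdr, dc, hdc, hone, rfl⟩
    refine ⟨hone, ?_, ?_, ?_, ?_⟩ <;> simp at hdr hdc <;> simp <;> omega
  · rintro ⟨hone, h1, h2, h3, h4⟩
    refine ⟨q.2 - p.2, ?_, q.1 - p.1, ?_, ?_, ?_⟩
    · simp; omega
    · simp; omega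
    · simpa using hone
    · simp

theorem pvGrow_nodup (m : List (List Int)) (cols rows : Int) (S : PySem.Set (Int × Int))
    (hS : S.Nodup) : (pvGrow m cols rows S).Nodup := by
  unfold pvGrow
  refine pvFoldNodup _ ?_ _ _ hS
  intro acc b hacc
  refine pvFoldNodup _ ?_ _ _ hacc
  intro acc2 b2 hacc2
  refine pvFoldNodup _ ?_ _ _ hacc2
  intro acc3 b3 hacc3
  split
  · exact PySem.Set.nodup_add _ _ hacc3
  · exact hacc3

theorem pvGrow_subset (m : List (List Int)) (cols rows : Int) (S : PySem.Set (Int × Int))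
    {q : Int × Int} (h : q ∈ S) : q ∈ pvGrow m cols rows S :=
  (pvGrow_mem m cols rows S q).2 (Or.inl h)

-- ---- adjacency / reachability basics ----

theorem pvAdj_symm (m : List (List Int)) {p q : Int × Int} (h : pvAdj m p q) : pvAdj m q p := by
  obtain ⟨h1, h2, h3⟩ := h
  exact ⟨h2, h1, by unfold pvNear at h3 ⊢; omega⟩

theorem pvReach_symm (m : List (List Int)) {p q : Int × Int} (h : pvReach m p q) :
    pvReach m q p :=
  Relation.ReflTransGen.symmetric (fun _ _ hab => pvAdj_symm m hab) h

theorem pvReach_one (m : List (List Int)) {p q : Int × Int} (hp : pvOneB m p = true)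
    (h : pvReach m p q) : pvOneB m q = true := by
  induction h with
  | refl => exact hp
  | tail _ hadj _ => exact hadj.2.1

theorem pvOneB_bounds (m : List (List Int)) {q : Int × Int} (h : pvOneB m q = true) :
    0 ≤ q.1 ∧ q.1 < pvColsZ m ∧ 0 ≤ q.2 ∧ q.2 < pvRowsZ m := by
  simp only [pvOneB, pvOne, Bool.and_eq_true, decide_eq_true_eq] at h
  exact ⟨h.1.1.1.1, h.1.1.1.2, h.1.1.2, h.1.2⟩

theorem pvOneB_cell (m : List (List Int)) {q : Int × Int} (h : pvOneB m q = true) :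
    pvCell m q.1 q.2 = 1 := by
  simp only [pvOneB, pvOne, Bool.and_eq_true, beq_iff_eq] at h
  exact h.2

theorem pvOneB_intro (m : List (List Int)) {q : Int × Int}
    (h1 : 0 ≤ q.1) (h2 : q.1 < pvColsZ m) (h3 : 0 ≤ q.2) (h4 : q.2 < pvRowsZ m)
    (h5 : pvCell m q.1 q.2 = 1) : pvOneB m q = true := by
  simp only [pvOneB, pvOne, Bool.and_eq_true, decide_eq_true_eq, beq_iff_eq]
  exact ⟨⟨⟨⟨h1, h2⟩, h3⟩, h4⟩, h5⟩

theorem pvMem_cellsL (m : List (List Int)) (q : Int × Int) :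
    q ∈ pvCellsL m ↔ 0 ≤ q.1 ∧ q.1 < pvColsZ m ∧ 0 ≤ q.2 ∧ q.2 < pvRowsZ m := by
  simp only [pvCellsL, List.mem_map, pvColsZ, pvRowsZ]
  constructor
  · rintro ⟨⟨r, c⟩, hm, rfl⟩
    rw [List.mem_product] at hm
    simp only [List.mem_range] at hm
    dsimp only
    refine ⟨by positivity, by exact_mod_cast hm.2, by positivity, by exact_mod_cast hm.1⟩
  · rintro ⟨h1, h2, h3, h4⟩
    refine ⟨(q.2.toNat, q.1.toNat), ?_, ?_⟩
    · rw [List.mem_product]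
      simp only [List.mem_range]
      omega
    · have e1 : (q.1.toNat : Int) = q.1 := Int.toNat_of_nonneg h1
      have e2 : (q.2.toNat : Int) = q.2 := Int.toNat_of_nonneg h3
      dsimp only
      rw [e1, e2]

theorem pvCellsL_nodup (m : List (List Int)) : (pvCellsL m).Nodup := by
  refine List.Nodup.map_on ?_ (List.Nodup.product (List.nodup_range) (List.nodup_range))
  rintro ⟨r1, c1⟩ _ ⟨r2, c2⟩ _ h
  simp only [Prod.mk.injEq] at h
  have : c1 = c2 := by exact_mod_cast h.1
  have : r1 = r2 := by exact_mod_cast h.2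
  simp_all

theorem pvCellsL_length (m : List (List Int)) :
    (pvCellsL m).length = m.length * m.headI.length := by
  simp [pvCellsL, List.length_product]

theorem pvLen_le_n (m : List (List Int)) (S : List (Int × Int)) (hnd : S.Nodup)
    (hones : ∀ x ∈ S, pvOneB m x = true) : S.length ≤ m.length * m.headI.length := by
  have hsub : S.toFinset ⊆ (pvCellsL m).toFinset := by
    intro x hx
    rw [List.mem_toFinset] at hx ⊢
    have := pvOneB_bounds m (hones x hx)
    exact (pvMem_cellsL m x).2 this
  calc S.length = S.toFinset.card := (List.toFinset_card_of_nodup hnd).symm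
    _ ≤ (pvCellsL m).toFinset.card := Finset.card_le_card hsub
    _ ≤ (pvCellsL m).length := List.toFinset_card_le _
    _ = m.length * m.headI.length := pvCellsL_length m

-- under Nodup, a subset of equal length is setwise equal
theorem pvSubset_len_eq {S T : List (Int × Int)} (hS : S.Nodup) (hT : T.Nodup)
    (hsub : ∀ x ∈ S, x ∈ T) (hlen : T.length = S.length) : ∀ x ∈ T, x ∈ S := by
  intro x hx
  have hsub' : S.toFinset ⊆ T.toFinset := by
    intro y hy; rw [List.mem_toFinset] at hy ⊢; exact hsub y hy
  have hcard : T.toFinset.card ≤ S.toFinset.card := by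
    rw [List.toFinset_card_of_nodup hS, List.toFinset_card_of_nodup hT]; omega
  have := Finset.eq_of_subset_of_card_le hsub' hcard
  rw [← List.mem_toFinset, ← this, List.mem_toFinset] at hx
  exact hx

-- ---- saturate: invariants, closedness, characterization ----

theorem pvSaturate_inv (m : List (List Int)) (p : Int × Int) :
    ∀ (fuel : Nat) (S : PySem.Set (Int × Int)), S.Nodup →
      (∀ x ∈ S, pvOneB m x = true) → (∀ x ∈ S, pvReach m p x) →
      (pvSaturate m (pvColsZ m) (pvRowsZ m) fuel S).Nodup ∧
      (∀ x ∈ pvSaturate m (pvColsZ m) (pvRowsZ m) fuel S, pvOneB m x = true) ∧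
      (∀ x ∈ pvSaturate m (pvColsZ m) (pvRowsZ m) fuel S, pvReach m p x) ∧
      (∀ x ∈ S, x ∈ pvSaturate m (pvColsZ m) (pvRowsZ m) fuel S) := by
  intro fuel
  induction fuel with
  | zero => intro S h1 h2 h3; exact ⟨h1, h2, h3, fun x hx => hx⟩
  | succ fuel ih =>
    intro S h1 h2 h3
    rw [pvSaturate]
    split
    · exact ⟨h1, h2, h3, fun x hx => hx⟩
    · have hg := pvGrow_mem m (pvColsZ m) (pvRowsZ m) S
      have hnd : (pvGrow m (pvColsZ m) (pvRowsZ m) S).Nodup := pvGrow_nodup _ _ _ _ h1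
      have hones : ∀ x ∈ pvGrow m (pvColsZ m) (pvRowsZ m) S, pvOneB m x = true := by
        intro x hx
        rcases (hg x).1 hx with h | ⟨p', _, hone, _⟩
        · exact h2 x h
        · exact hone
      have hreach : ∀ x ∈ pvGrow m (pvColsZ m) (pvRowsZ m) S, pvReach m p x := by
        intro x hx
        rcases (hg x).1 hx with h | ⟨p', hp', hone, hnear⟩
        · exact h3 x h
        · exact Relation.ReflTransGen.tail (h3 p' hp') ⟨h2 p' hp', hone, hnear⟩
      obtain ⟨a, b, c, d⟩ := ih _ hnd hones hreach
      exact ⟨a, b, c, fun x hx => d x (pvGrow_subset _ _ _ _ hx)⟩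

theorem pvSaturate_closed (m : List (List Int)) :
    ∀ (fuel : Nat) (S : PySem.Set (Int × Int)), S.Nodup →
      (∀ x ∈ S, pvOneB m x = true) →
      (m.length * m.headI.length + 1 ≤ fuel + S.length) →
      ∀ x ∈ pvSaturate m (pvColsZ m) (pvRowsZ m) fuel S, ∀ q : Int × Int,
        pvOneB m q = true → pvNear x q →
        q ∈ pvSaturate m (pvColsZ m) (pvRowsZ m) fuel S := by
  intro fuel
  induction fuel with
  | zero =>
    intro S h1 h2 hlen
    have := pvLen_le_n m S h1 h2
    omega
  | succ fuel ih =>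
    intro S h1 h2 hlen
    rw [pvSaturate]
    split
    all_goals rename_i hlen2
    · -- fixpoint: grown has the same length, so grow S = S as sets
      intro x hx q hq hnear
      have hqg : q ∈ pvGrow m (pvColsZ m) (pvRowsZ m) S :=
        (pvGrow_mem m _ _ S q).2 (Or.inr ⟨x, hx, hq, hnear⟩)
      exact pvSubset_len_eq h1 (pvGrow_nodup _ _ _ _ h1)
        (fun y hy => pvGrow_subset _ _ _ _ hy) hlen2 q hqg
    · -- still growing: the set got strictly larger
      have hnd : (pvGrow m (pvColsZ m) (pvRowsZ m) S).Nodup := pvGrow_nodup _ _ _ _ h1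
      have hones : ∀ x ∈ pvGrow m (pvColsZ m) (pvRowsZ m) S, pvOneB m x = true := by
        intro x hx
        rcases (pvGrow_mem m _ _ S x).1 hx with h | ⟨p', _, hone, _⟩
        · exact h2 x h
        · exact hone
      have hgrowlen : S.length + 1 ≤ (pvGrow m (pvColsZ m) (pvRowsZ m) S).length := by
        have hsub : S.toFinset ⊆ (pvGrow m (pvColsZ m) (pvRowsZ m) S).toFinset := by
          intro y hy; rw [List.mem_toFinset] at hy ⊢; exact pvGrow_subset _ _ _ _ hy
        have := Finset.card_le_card hsub
        rw [List.toFinset_card_of_nodup h1, List.toFinset_card_of_nodup hnd] at this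
        omega
      exact ih _ hnd hones (by omega)

theorem pvCompList_spec (m : List (List Int)) (p : Int × Int) (hp : pvOneB m p = true) :
    (pvCompList m p).Nodup ∧ ∀ q, (q ∈ pvCompList m p ↔ pvReach m p q) := by
  have hofl : (PySem.Set.ofList [p] : List (Int × Int)) = [p] := by
    simp [PySem.Set.ofList_eq_self_of_nodup]
  have h1 : (PySem.Set.ofList [p] : List (Int × Int)).Nodup := by rw [hofl]; simp
  have h2 : ∀ x ∈ (PySem.Set.ofList [p] : List (Int × Int)), pvOneB m x = true := by
    rw [hofl]; intro x hx; simp at hx; subst hx; exact hp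
  have h3 : ∀ x ∈ (PySem.Set.ofList [p] : List (Int × Int)), pvReach m p x := by
    rw [hofl]; intro x hx; simp at hx; subst hx; exact Relation.ReflTransGen.refl
  obtain ⟨hnd, hones, hreach, hsub⟩ := pvSaturate_inv m p (m.length * m.headI.length) _ h1 h2 h3
  have hclosed := pvSaturate_closed m (m.length * m.headI.length) _ h1 h2 (by rw [hofl]; simp)
  refine ⟨hnd, fun q => ⟨fun hq => hreach q hq, fun hq => ?_⟩⟩
  have hpin : p ∈ pvCompList m p := hsub p (by rw [hofl]; simp)
  unfold pvCompList
  induction hq with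
  | refl => exact hpin
  | tail hr hadj ih => exact hclosed _ ih _ hadj.2.1 hadj.2.2

theorem pvCsize_congr (m : List (List Int)) {p q : Int × Int} (hp : pvOneB m p = true)
    (h : pvReach m p q) : pvCsize m q = pvCsize m p := by
  have hq : pvOneB m q = true := pvReach_one m hp h
  obtain ⟨hnp, hmp⟩ := pvCompList_spec m p hp
  obtain ⟨hnq, hmq⟩ := pvCompList_spec m q hq
  have hperm : List.Perm (pvCompList m q) (pvCompList m p) := by
    rw [List.perm_ext_iff_of_nodup hnq hnp]
    intro x
    rw [hmq x, hmp x]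
    exact ⟨fun hx => Relation.ReflTransGen.trans h hx,
           fun hx => Relation.ReflTransGen.trans (pvReach_symm m h) hx⟩
  exact hperm.length_eq

-- ---- neighbors characterization (A side) ----

theorem pvNeighbors_len (p : Int × Int) (cols rows : Int) :
    (pvNeighbors p cols rows).length ≤ 9 := by
  unfold pvNeighbors
  have h := pvFoldLen (α := Int × Int) (β := Int)
    (fun acc ro =>
      [(-1 : Int), 0, 1].foldl (fun acc co =>
        if ro = 0 ∧ co = 0 then acc
        else
          let nc := p.1 + co
          let nr := p.2 + ro
          if 0 ≤ nc ∧ nc < cols ∧ 0 ≤ nr ∧ nr < rows then acc ++ [(nc, nr)] else acc) acc) 3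
    ?_ [(-1 : Int), 0, 1] []
  · simpa using h
  · intro acc b
    have h2 := pvFoldLen (α := Int × Int) (β := Int)
      (fun acc co =>
        if b = 0 ∧ co = 0 then acc
        else
          let nc := p.1 + co
          let nr := p.2 + b
          if 0 ≤ nc ∧ nc < cols ∧ 0 ≤ nr ∧ nr < rows then acc ++ [(nc, nr)] else acc) 1
      ?_ [(-1 : Int), 0, 1] acc
    · simpa using h2
    · intro acc2 b2
      dsimp only
      split
      · omega
      · split <;> simp

theorem pvNeighbors_mem (p : Int × Int) (cols rows : Int) (q : Int × Int) :
    q ∈ pvNeighbors p cols rows ↔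
      ¬ q = p ∧ pvNear p q ∧ 0 ≤ q.1 ∧ q.1 < cols ∧ 0 ≤ q.2 ∧ q.2 < rows := by
  have hinner : ∀ (ro : Int) (acc : List (Int × Int)) (x : Int × Int),
      x ∈ ([(-1 : Int), 0, 1].foldl (fun acc co =>
            if ro = 0 ∧ co = 0 then acc
            else
              let nc := p.1 + co
              let nr := p.2 + ro
              if 0 ≤ nc ∧ nc < cols ∧ 0 ≤ nr ∧ nr < rows then acc ++ [(nc, nr)] else acc) acc) ↔
        x ∈ acc ∨ ∃ co ∈ [(-1 : Int), 0, 1], ¬(ro = 0 ∧ co = 0) ∧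
          (0 ≤ p.1 + co ∧ p.1 + co < cols ∧ 0 ≤ p.2 + ro ∧ p.2 + ro < rows) ∧
          x = (p.1 + co, p.2 + ro) := by
    intro ro acc x
    refine pvFoldMemChain _ (fun co x => ¬(ro = 0 ∧ co = 0) ∧
      (0 ≤ p.1 + co ∧ p.1 + co < cols ∧ 0 ≤ p.2 + ro ∧ p.2 + ro < rows) ∧
      x = (p.1 + co, p.2 + ro)) ?_ _ acc x
    intro acc2 b x2
    dsimp only
    split
    · rename_i hskip
      simp [hskip]
    · rename_i hskip
      split
      · rename_i hbnd
        simp [hskip, hbnd]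
      · rename_i hbnd
        simp [hskip, hbnd]
  have houter : q ∈ pvNeighbors p cols rows ↔
      ∃ ro ∈ [(-1 : Int), 0, 1], ∃ co ∈ [(-1 : Int), 0, 1], ¬(ro = 0 ∧ co = 0) ∧
        (0 ≤ p.1 + co ∧ p.1 + co < cols ∧ 0 ≤ p.2 + ro ∧ p.2 + ro < rows) ∧
        q = (p.1 + co, p.2 + ro) := by
    unfold pvNeighbors
    rw [pvFoldMemChain _ (fun ro x => ∃ co ∈ [(-1 : Int), 0, 1], ¬(ro = 0 ∧ co = 0) ∧
        (0 ≤ p.1 + co ∧ p.1 + co < cols ∧ 0 ≤ p.2 + ro ∧ p.2 + ro < rows) ∧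
        x = (p.1 + co, p.2 + ro)) (fun acc b x => hinner b acc x) _ [] q]
    simp
  rw [houter]
  constructor
  · rintro ⟨ro, hro, co, hco, hskip, hbnd, rfl⟩
    simp only [List.mem_cons] at hro hco
    have hco' : -1 ≤ co ∧ co ≤ 1 := by
      rcases hco with rfl | rfl | h <;> [norm_num; norm_num; skip]
      rcases h with rfl | h <;> [norm_num; simp at h]
    have hro' : -1 ≤ ro ∧ ro ≤ 1 := by
      rcases hro with rfl | rfl | h <;> [norm_num; norm_num; skip]
      rcases h with rfl | h <;> [norm_num; simp at h]
    constructor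
    · intro hq
      rw [Prod.ext_iff] at hq
      dsimp only at hq
      exact hskip ⟨by omega, by omega⟩
    · refine ⟨⟨by dsimp only; omega, by dsimp only; omega, by dsimp only; omega, by dsimp only; omega⟩,
        by dsimp only; omega, by dsimp only; omega, by dsimp only; omega, by dsimp only; omega⟩
  · rintro ⟨hne, hnear, h1, h2, h3, h4⟩
    obtain ⟨n1, n2, n3, n4⟩ := hnear
    refine ⟨q.2 - p.2, ?_, q.1 - p.1, ?_, ?_, ?_, ?_⟩
    · simp; omega
    · simp; omega
    · rintro ⟨e1, e2⟩
      apply hne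
      rw [Prod.ext_iff]
      constructor <;> omega
    · constructor <;> [skip; constructor] <;> [omega; omega; constructor] <;> omega
    · rw [Prod.ext_iff]
      constructor <;> dsimp only <;> omega

-- ---- the unseen-foreground counter strictly drops when a new cell is marked seen ----

theorem pvCnt_dec (m : List (List Int)) (seen : List (Int × Int)) (p : Int × Int)
    (hone : pvOneB m p = true) (hns : p ∉ seen) :
    pvCnt m (seen ++ [p]) + 1 ≤ pvCnt m seen := by
  have hpc : p ∈ pvCellsL m := (pvMem_cellsL m p).2 (pvOneB_bounds m hone)
  obtain ⟨s, t, hst⟩ := List.append_of_mem hpc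
  have hnd := pvCellsL_nodup m
  rw [hst] at hnd
  have hps : p ∉ s := by
    intro h
    exact (List.disjoint_of_nodup_append hnd) h (List.mem_cons_self)
  have hpt : p ∉ t := by
    have := (List.nodup_append.1 hnd).2.1
    simp [List.nodup_cons] at this
    exact this.1
  unfold pvCnt
  rw [hst, List.countP_append, List.countP_append, List.countP_cons, List.countP_cons]
  have hcongr : ∀ (l : List (Int × Int)), p ∉ l →
      l.countP (fun q => pvOneB m q && !(decide (q ∈ seen ++ [p]))) =
      l.countP (fun q => pvOneB m q && !(decide (q ∈ seen))) := by
    intro l hpl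
    apply List.countP_congr
    intro x hx
    have hxp : x ≠ p := fun h => hpl (h ▸ hx)
    simp [List.mem_append, hxp]
  rw [hcongr s hps, hcongr t hpt]
  have h1 : (pvOneB m p && !(decide (p ∈ seen ++ [p]))) = false := by
    simp
  have h2 : (pvOneB m p && !(decide (p ∈ seen))) = true := by
    simp [hone, hns]
  rw [h1, h2]
  rw [if_neg (by simp : ¬ (false = true)), if_pos (rfl : true = true)]
  omega

-- ---- the DFS worklist loop of A ----

theorem pvCollectMaster (m : List (List Int)) (R : Int × Int → Prop)
    (hRcl : ∀ x q, R x → pvAdj m x q → R q) :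
    ∀ (fuel : Nat) (stack seen comp : List (Int × Int)),
      (∀ x ∈ stack, pvOneB m x = true ∧ R x) →
      seen.Nodup →
      (∀ x ∈ comp, ∀ q, pvAdj m x q → q ∈ seen ∨ q ∈ stack) →
      10 * pvCnt m seen + stack.length < fuel →
      ∃ d : List (Int × Int),
        pvCollectLoop m (pvColsZ m) (pvRowsZ m) fuel stack seen comp = (comp ++ d, seen ++ d) ∧
        d.Nodup ∧
        (∀ x ∈ d, pvOneB m x = true ∧ R x ∧ x ∉ seen) ∧
        (∀ x ∈ stack, x ∈ seen ++ d) ∧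
        (∀ x ∈ comp ++ d, ∀ q, pvAdj m x q → q ∈ seen ++ d) := by
  intro fuel
  induction fuel with
  | zero => intro stack seen comp _ _ _ hμ; omega
  | succ fuel ih =>
    intro stack seen comp h1 h2 h6 hμ
    match stack with
    | [] =>
      refine ⟨[], by simp [pvCollectLoop], by simp, by simp, by simp, ?_⟩
      intro x hx q hq
      rcases h6 x (by simpa using hx) q hq with h | h
      · simpa using h
      · simp at h
    | p :: rest =>
      have hpone := (h1 p (List.mem_cons_self)).1
      have hpR := (h1 p (List.mem_cons_self)).2
      by_cases hc : p ∈ seen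
      · -- already seen: skip
        have hcb : PySem.Set.contains seen p = true := (PySem.Set.contains_iff seen p).2 hc
        have hstep : pvCollectLoop m (pvColsZ m) (pvRowsZ m) (fuel + 1) (p :: rest) seen comp =
            pvCollectLoop m (pvColsZ m) (pvRowsZ m) fuel rest seen comp := by
          rw [pvCollectLoop]
          simp only [hcb, if_true]
        rw [hstep]
        obtain ⟨d, heq, hnd, hprops, hc5, hc6⟩ := ih rest seen comp
          (fun x hx => h1 x (List.mem_cons_of_mem _ hx)) h2
          (by
            intro x hx q hq
            rcases h6 x hx q hq with h | h
            · exact Or.inl h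
            · rcases List.mem_cons.1 h with rfl | h'
              · exact Or.inl hc
              · exact Or.inr h')
          (by simp at hμ ⊢; omega)
        refine ⟨d, heq, hnd, hprops, ?_, hc6⟩
        intro x hx
        rcases List.mem_cons.1 hx with rfl | h'
        · exact List.mem_append_left _ hc
        · exact hc5 x h'
      · -- new cell: it is a foreground cell, gets seen, enters comp, neighbors pushed
        have hcb : PySem.Set.contains seen p = false := by
          rw [← Bool.not_eq_true, PySem.Set.contains_iff]; exact hc
        have hcell : pvCell m p.1 p.2 = 1 := pvOneB_cell m hpone
        have hadd : PySem.Set.add seen p = seen ++ [p] := by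
          simp [PySem.Set.add, hc]
        have hstep : pvCollectLoop m (pvColsZ m) (pvRowsZ m) (fuel + 1) (p :: rest) seen comp =
            pvCollectLoop m (pvColsZ m) (pvRowsZ m) fuel
              ((pvNeighbors p (pvColsZ m) (pvRowsZ m)).foldl
                (fun st q =>
                  if pvCell m q.1 q.2 = 1 ∧ ¬ PySem.Set.contains (PySem.Set.add seen p) q then
                    q :: st
                  else st)
                rest)
              (PySem.Set.add seen p) (comp ++ [p]) := by
          rw [pvCollectLoop]
          simp only [hcb, Bool.false_eq_true, if_false, hcell, ne_eq, not_true_eq_false]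
        set stack1 := (pvNeighbors p (pvColsZ m) (pvRowsZ m)).foldl
          (fun st q =>
            if pvCell m q.1 q.2 = 1 ∧ ¬ PySem.Set.contains (PySem.Set.add seen p) q then
              q :: st
            else st)
          rest with hstack1
        have hmem1 : ∀ x, x ∈ stack1 ↔ x ∈ rest ∨
            (x ∈ pvNeighbors p (pvColsZ m) (pvRowsZ m) ∧ pvCell m x.1 x.2 = 1 ∧
              x ∉ seen ++ [p]) := by
          intro x
          rw [hstack1]
          rw [pvFoldMemChain _ (fun b x =>
            (pvCell m b.1 b.2 = 1 ∧ ¬ PySem.Set.contains (PySem.Set.add seen p) b) ∧ x = b)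
            ?_ _ rest x]
          · constructor
            · rintro (h | ⟨b, hb, ⟨hcell', hns'⟩, rfl⟩)
              · exact Or.inl h
              · refine Or.inr ⟨hb, hcell', ?_⟩
                rw [← hadd, ← PySem.Set.contains_iff]
                simpa using hns'
            · rintro (h | ⟨hb, hcell', hns'⟩)
              · exact Or.inl h
              · refine Or.inr ⟨x, hb, ⟨hcell', ?_⟩, rfl⟩
                simpa [PySem.Set.contains_iff, hadd] using hns'
          · intro acc b x2
            dsimp only
            split
            · rename_i hcond
              constructor
              · intro h
                rcases List.mem_cons.1 h with rfl | h
                · exact Or.inr ⟨hcond, rfl⟩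
                · exact Or.inl h
              · rintro (h | ⟨_, rfl⟩)
                · exact List.mem_cons_of_mem _ h
                · exact List.mem_cons_self
            · rename_i hcond
              constructor
              · exact Or.inl
              · rintro (h | ⟨hcond2, rfl⟩)
                · exact h
                · exact absurd hcond2 hcond
        have hlen1 : stack1.length ≤ rest.length + 9 := by
          have := pvFoldLen (α := Int × Int) (β := Int × Int)
            (fun st q =>
              if pvCell m q.1 q.2 = 1 ∧ ¬ PySem.Set.contains (PySem.Set.add seen p) q then
                q :: st
              else st) 1
            (by
              intro acc b
              dsimp only
              split <;> simp)
            (pvNeighbors p (pvColsZ m) (pvRowsZ m)) rest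
          have h9 := pvNeighbors_len p (pvColsZ m) (pvRowsZ m)
          rw [← hstack1] at this
          omega
        rw [hstep, hadd]
        have hH1 : ∀ x ∈ stack1, pvOneB m x = true ∧ R x := by
          intro x hx
          rcases (hmem1 x).1 hx with h | ⟨hnb, hcell', _⟩
          · exact h1 x (List.mem_cons_of_mem _ h)
          · obtain ⟨hne, hnear, hb1, hb2, hb3, hb4⟩ := (pvNeighbors_mem p _ _ x).1 hnb
            have hxone : pvOneB m x = true := pvOneB_intro m hb1 hb2 hb3 hb4 hcell'
            exact ⟨hxone, hRcl p x hpR ⟨hpone, hxone, hnear⟩⟩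
        have hH2 : (seen ++ [p]).Nodup := by
          refine List.Nodup.append h2 (List.nodup_singleton p) ?_
          intro a ha hb
          rw [List.mem_singleton] at hb
          rw [hb] at ha
          exact hc ha
        have hH6 : ∀ x ∈ comp ++ [p], ∀ q, pvAdj m x q → q ∈ seen ++ [p] ∨ q ∈ stack1 := by
          intro x hx q hq
          rcases List.mem_append.1 hx with hx' | hx'
          · rcases h6 x hx' q hq with h | h
            · exact Or.inl (List.mem_append_left _ h)
            · rcases List.mem_cons.1 h with rfl | h'
              · exact Or.inl (List.mem_append_right _ (List.mem_cons_self))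
              · exact Or.inr ((hmem1 q).2 (Or.inl h'))
          · have hxp : x = p := by simpa using hx'
            rw [hxp] at hq
            by_cases hqs : q ∈ seen ++ [p]
            · exact Or.inl hqs
            · refine Or.inr ((hmem1 q).2 (Or.inr ⟨?_, pvOneB_cell m hq.2.1, hqs⟩))
              rw [pvNeighbors_mem]
              have hb := pvOneB_bounds m hq.2.1
              refine ⟨fun hqp => hqs ?_, hq.2.2, hb.1, hb.2.1, hb.2.2.1, hb.2.2.2⟩
              rw [hqp]
              exact List.mem_append_right _ (List.mem_cons_self)
        have hHm : 10 * pvCnt m (seen ++ [p]) + stack1.length < fuel := by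
          have hdec := pvCnt_dec m seen p hpone hc
          simp only [List.length_cons] at hμ
          omega
        obtain ⟨d, heq, hnd, hprops, hc5, hc6⟩ := ih stack1 (seen ++ [p]) (comp ++ [p]) hH1 hH2 hH6 hHm
        refine ⟨p :: d, ?_, ?_, ?_, ?_, ?_⟩
        · rw [heq]
          simp
        · rw [List.nodup_cons]
          refine ⟨fun hpd => ?_, hnd⟩
          exact (hprops p hpd).2.2 (List.mem_append_right _ (List.mem_cons_self))
        · intro x hx
          rcases List.mem_cons.1 hx with rfl | hx'
          · exact ⟨hpone, hpR, hc⟩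
          · obtain ⟨ha, hb, hc'⟩ := hprops x hx'
            exact ⟨ha, hb, fun hxs => hc' (List.mem_append_left _ hxs)⟩
        · intro x hx
          rcases List.mem_cons.1 hx with rfl | hx'
          · exact List.mem_append_right _ (List.mem_cons_self)
          · have hxs : x ∈ stack1 := (hmem1 x).2 (Or.inl hx')
            have := hc5 x hxs
            simpa using this
        · intro x hx q hq
          have hx' : x ∈ (comp ++ [p]) ++ d := by simpa using hx
          have := hc6 x hx' q hq
          simpa using this

-- ---- specification of _collect_component ----

theorem pvCollect_spec (m : List (List Int)) (start : Int × Int) (seen : List (Int × Int))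
    (hone : pvOneB m start = true) (hns : start ∉ seen) (hnd : seen.Nodup)
    (hco : ∀ x ∈ seen, ∀ q, pvAdj m x q → q ∈ seen) :
    ∃ d : List (Int × Int),
      pvCollect m start seen = (d, seen ++ d) ∧
      d.Nodup ∧
      (∀ x, x ∈ d ↔ pvReach m start x) ∧
      (∀ x ∈ d, pvOneB m x = true ∧ x ∉ seen) ∧
      d.length = pvCsize m start ∧
      (seen ++ d).Nodup ∧
      (∀ x ∈ seen ++ d, ∀ q, pvAdj m x q → q ∈ seen ++ d) := by
  have hRcl : ∀ x q, pvReach m start x → pvAdj m x q → pvReach m start q :=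
    fun x q hr ha => Relation.ReflTransGen.tail hr ha
  have hμ : 10 * pvCnt m seen + ([start] : List (Int × Int)).length <
      10 * (m.length * m.headI.length) + 2 := by
    have hle : pvCnt m seen ≤ m.length * m.headI.length := by
      unfold pvCnt
      calc (pvCellsL m).countP _ ≤ (pvCellsL m).length := List.countP_le_length
        _ = m.length * m.headI.length := pvCellsL_length m
    simp only [List.length_cons, List.length_nil]
    omega
  obtain ⟨d, heq, hdnd, hprops, hc5, hc6⟩ := pvCollectMaster m (pvReach m start) hRcl
    (10 * (m.length * m.headI.length) + 2) [start] seen []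
    (fun x hx => by
      rw [List.mem_singleton] at hx
      subst hx
      exact ⟨hone, Relation.ReflTransGen.refl⟩)
    hnd (by simp) hμ
  simp only [List.nil_append] at heq hc6
  have hstart : start ∈ d := by
    have := hc5 start (List.mem_singleton.2 rfl)
    rcases List.mem_append.1 this with h | h
    · exact absurd h hns
    · exact h
  have hmem : ∀ x, x ∈ d ↔ pvReach m start x := by
    intro x
    constructor
    · exact fun hx => (hprops x hx).2.1
    · intro hr
      induction hr with
      | refl => exact hstart
      | @tail b c hr' hadj ih =>
        rcases List.mem_append.1 (hc6 b ih c hadj) with h | h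
        · -- c would be in the closed old seen, pulling b in too: contradiction
          exfalso
          exact (hprops b ih).2.2 (hco c h b (pvAdj_symm m hadj))
        · exact h
  have hdisj : ∀ x ∈ d, x ∉ seen := fun x hx => (hprops x hx).2.2
  refine ⟨d, ?_, hdnd, hmem, fun x hx => ⟨(hprops x hx).1, hdisj x hx⟩, ?_, ?_, ?_⟩
  · -- pvCollect unfolds to the loop with this fuel
    unfold pvCollect
    exact heq
  · -- |d| = csize start : both enumerate the reach set without duplicates
    obtain ⟨hcnd, hcm⟩ := pvCompList_spec m start hone
    have hperm : List.Perm d (pvCompList m start) := by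
      rw [List.perm_ext_iff_of_nodup hdnd hcnd]
      intro x
      rw [hmem x, hcm x]
    exact hperm.length_eq
  · refine List.Nodup.append hnd hdnd ?_
    intro a ha hb
    exact hdisj a hb ha
  · intro x hx q hq
    rcases List.mem_append.1 hx with h | h
    · exact List.mem_append_left _ (hco x h q hq)
    · exact hc6 x h q hq

-- ---- rendering the kept grid ----

theorem pvSet_map_range {α : Type} (n k : Nat) (f : Nat → α) (v : α) (hk : k < n) :
    ((List.range n).map f).set k v = (List.range n).map (fun i => if i = k then v else f i) := by
  apply List.ext_getElem
  · simp
  · intro i h1 h2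
    simp only [List.length_set, List.length_map, List.length_range] at h1
    by_cases hik : i = k
    · subst hik
      simp
    · simp [List.getElem_set]
      rw [if_neg (fun h => hik h.symm), if_neg hik]

theorem pvRender_congr (m : List (List Int)) (P Q : Int × Int → Bool)
    (h : ∀ x, P x = Q x) : pvRender m P = pvRender m Q :=
  congrArg (pvRender m) (funext h)

theorem pvRender_getRow (m : List (List Int)) (P : Int × Int → Bool) (r : Int)
    (h1 : 0 ≤ r) (h2 : r < pvRowsZ m) :
    PySem.List.pyGetD (pvRender m P) r [] =
      (List.range m.headI.length).map (fun (c : Nat) => if P ((c : Int), r) then (1 : Int) else 0) := by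
  rw [PySem.List.pyGetD_of_nonneg _ _ h1]
  unfold pvRender
  have hr : r.toNat < m.length := by
    unfold pvRowsZ at h2; omega
  rw [List.getD_eq_getElem _ _ (by simpa using hr)]
  rw [List.getElem_map, List.getElem_range]
  have : ((r.toNat : Int)) = r := Int.toNat_of_nonneg h1
  rw [this]

theorem pvSetKept_render (m : List (List Int)) (P : Int × Int → Bool) (c r : Int)
    (hb1 : 0 ≤ c) (hb2 : c < pvColsZ m) (hb3 : 0 ≤ r) (hb4 : r < pvRowsZ m) :
    pvSetKept (pvRender m P) c r = pvRender m (fun x => decide (x = (c, r)) || P x) := by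
  unfold pvSetKept
  rw [pvRender_getRow m P r hb3 hb4]
  rw [PySem.List.pySetD_of_nonneg _ _ hb1, PySem.List.pySetD_of_nonneg _ _ hb3]
  have hcn : c.toNat < m.headI.length := by unfold pvColsZ at hb2; omega
  have hrn : r.toNat < m.length := by unfold pvRowsZ at hb4; omega
  rw [pvSet_map_range _ _ _ _ hcn]
  unfold pvRender
  rw [pvSet_map_range _ _ _ _ hrn]
  apply List.map_congr_left
  intro j hj
  rw [List.mem_range] at hj
  by_cases hjr : j = r.toNat
  · rw [if_pos hjr]
    apply List.map_congr_left
    intro i hi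
    rw [List.mem_range] at hi
    have hjr' : ((j : Int)) = r := by omega
    by_cases hic : i = c.toNat
    · have hci : ((i : Int)) = c := by omega
      rw [if_pos hic, hjr', hci]
      simp
    · rw [if_neg hic, hjr']
      have hne : ¬(((i : Int), r) = (c, r)) := by
        intro hh
        rw [Prod.ext_iff] at hh
        dsimp only at hh
        omega
      simp [hne]
  · rw [if_neg hjr]
    apply List.map_congr_left
    intro i _
    have hne : ¬(((i : Int), (j : Int)) = (c, r)) := by
      intro hh
      rw [Prod.ext_iff] at hh
      dsimp only at hh
      omega
    simp [hne]

theorem pvFoldKept (m : List (List Int)) :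
    ∀ (dd : List (Int × Int)) (P : Int × Int → Bool),
      (∀ q ∈ dd, pvOneB m q = true) →
      dd.foldl (fun k q => pvSetKept k q.1 q.2) (pvRender m P) =
        pvRender m (fun x => decide (x ∈ dd) || P x) := by
  intro dd
  induction dd with
  | nil =>
    intro P _
    simp only [List.foldl_nil]
    exact pvRender_congr _ _ _ (by simp)
  | cons q t ih =>
    intro P hq
    have hb := pvOneB_bounds m (hq q (List.mem_cons_self))
    simp only [List.foldl_cons]
    have hq' : pvSetKept (pvRender m P) q.1 q.2 =
        pvRender m (fun x => decide (x = (q.1, q.2)) || P x) :=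
      pvSetKept_render m P q.1 q.2 hb.1 hb.2.1 hb.2.2.1 hb.2.2.2
    rw [hq', ih _ (fun x hx => hq x (List.mem_cons_of_mem _ hx))]
    apply pvRender_congr
    intro x
    by_cases h1 : x ∈ t <;> by_cases h2 : x = q <;> simp [h1, h2]

-- ---- the outer scan of A ----

def pvABody (m : List (List Int)) (mp : Int) (ri : Int)
    (st : List (List Int) × PySem.Set (Int × Int)) (ci : Int) :
    List (List Int) × PySem.Set (Int × Int) :=
  if pvCell m ci ri ≠ 1 ∨ PySem.Set.contains st.2 (ci, ri) then st
  else
    let cr := pvCollect m (ci, ri) st.2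
    if (cr.1.length : Int) < mp then (st.1, cr.2)
    else (cr.1.foldl (fun k q => pvSetKept k q.1 q.2) st.1, cr.2)

def pvAInv (m : List (List Int)) (mp : Int) (done : Int × Int → Prop)
    (st : List (List Int) × PySem.Set (Int × Int)) : Prop :=
  st.2.Nodup ∧ (∀ x ∈ st.2, pvOneB m x = true) ∧
  (∀ x ∈ st.2, ∀ q, pvAdj m x q → q ∈ st.2) ∧
  (∀ p, pvOneB m p = true → done p → p ∈ st.2) ∧
  st.1 = pvRender m (fun q => decide (q ∈ st.2) && decide (mp ≤ (pvCsize m q : Int)))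

theorem pvAInv_weaken (m : List (List Int)) (mp : Int) (done done' : Int × Int → Prop)
    (st : List (List Int) × PySem.Set (Int × Int)) (h : ∀ q, done' q → done q) :
    pvAInv m mp done st → pvAInv m mp done' st :=
  fun ⟨a, b, c, d, e⟩ => ⟨a, b, c, fun p hp hd => d p hp (h p hd), e⟩

theorem pvAStep (m : List (List Int)) (mp : Int) (ri ci : Int)
    (hci : 0 ≤ ci ∧ ci < pvColsZ m) (hri : 0 ≤ ri ∧ ri < pvRowsZ m)
    (done : Int × Int → Prop) (st : List (List Int) × PySem.Set (Int × Int))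
    (h : pvAInv m mp done st) :
    pvAInv m mp (fun q => done q ∨ q = (ci, ri)) (pvABody m mp ri st ci) := by
  obtain ⟨hnd, hones, hcl, hdone, hrend⟩ := h
  unfold pvABody
  split
  · rename_i hcond
    refine ⟨hnd, hones, hcl, ?_, hrend⟩
    intro p hp hdp
    rcases hdp with hdp | rfl
    · exact hdone p hp hdp
    · rcases hcond with hcell | hcont
      · exact absurd (pvOneB_cell m hp) hcell
      · exact (PySem.Set.contains_iff _ _).1 hcont
  · rename_i hcond
    have hcell : pvCell m ci ri = 1 := by
      by_contra hne
      exact hcond (Or.inl hne)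
    have hcont : ¬ PySem.Set.contains st.2 (ci, ri) = true := fun hh => hcond (Or.inr hh)
    have hns : (ci, ri) ∉ st.2 := by
      intro hmem
      exact hcont (by rw [PySem.Set.contains_iff]; exact hmem)
    have hone' : pvOneB m (ci, ri) = true :=
      pvOneB_intro m hci.1 hci.2 hri.1 hri.2 (by simpa using hcell)
    obtain ⟨d, heq, hdnd, hdmem, hdprops, hdlen, hsnd, hscl⟩ :=
      pvCollect_spec m (ci, ri) st.2 hone' hns hnd hcl
    rw [heq]
    dsimp only
    have hdones : ∀ x ∈ st.2 ++ d, pvOneB m x = true := by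
      intro x hx
      rcases List.mem_append.1 hx with h | h
      · exact hones x h
      · exact (hdprops x h).1
    have hstart : (ci, ri) ∈ d := (hdmem _).2 Relation.ReflTransGen.refl
    have hcsz : ∀ x ∈ d, pvCsize m x = d.length := by
      intro x hx
      rw [pvCsize_congr m hone' ((hdmem x).1 hx), ← hdlen]
    have hdognes : ∀ p, pvOneB m p = true → (done p ∨ p = (ci, ri)) → p ∈ (st.2 ++ d : List _) := by
      intro p hp hdp
      rcases hdp with hdp | rfl
      · exact List.mem_append_left _ (hdone p hp hdp)
      · exact List.mem_append_right _ hstart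
    split
    · rename_i hlt
      refine ⟨hsnd, hdones, hscl, hdognes, ?_⟩
      dsimp only
      rw [hrend]
      apply pvRender_congr
      intro x
      by_cases hxd : x ∈ d
      · have hx2 : x ∉ st.2 := (hdprops x hxd).2
        have : ¬ (mp ≤ (pvCsize m x : Int)) := by
          rw [hcsz x hxd]
          omega
        simp [hx2, this]
      · have : (x ∈ st.2 ++ d) ↔ x ∈ st.2 := by
          rw [List.mem_append]
          exact ⟨fun h => h.resolve_right hxd, Or.inl⟩
        simp [this]
    · rename_i hge
      refine ⟨hsnd, hdones, hscl, hdognes, ?_⟩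
      dsimp only
      rw [hrend, pvFoldKept m d _ (fun q hq => (hdprops q hq).1)]
      apply pvRender_congr
      intro x
      by_cases hxd : x ∈ d
      · have hle : mp ≤ (pvCsize m x : Int) := by
          rw [hcsz x hxd]
          omega
        have hxsd : x ∈ st.2 ++ d := List.mem_append_right _ hxd
        simp [hxd, hxsd, hle]
      · have : (x ∈ st.2 ++ d) ↔ x ∈ st.2 := by
          rw [List.mem_append]
          exact ⟨fun h => h.resolve_right hxd, Or.inl⟩
        simp [hxd, this]

theorem pvARow (m : List (List Int)) (mp : Int) (ri : Int) (hri : 0 ≤ ri ∧ ri < pvRowsZ m) :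
    ∀ (cl : List Nat) (done : Int × Int → Prop) (st : List (List Int) × PySem.Set (Int × Int)),
      (∀ c ∈ cl, c < m.headI.length) → pvAInv m mp done st →
      pvAInv m mp (fun q => done q ∨ ∃ c ∈ cl, q = ((c : Int), ri))
        (cl.foldl (fun st c => pvABody m mp ri st ((c : Nat) : Int)) st) := by
  intro cl
  induction cl with
  | nil =>
    intro done st _ h
    refine pvAInv_weaken m mp done _ st ?_ h
    rintro q (hq | ⟨c, hc, _⟩)
    · exact hq
    · simp at hc
  | cons c t ih =>
    intro done st hcl h
    have hc : (c : Int) < pvColsZ m := by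
      have := hcl c (List.mem_cons_self)
      unfold pvColsZ
      omega
    have hstep := pvAStep m mp ri (c : Int) ⟨by positivity, hc⟩ hri done st h
    have := ih (fun q => done q ∨ q = ((c : Int), ri))
      (pvABody m mp ri st (c : Int)) (fun c' hc' => hcl c' (List.mem_cons_of_mem _ hc')) hstep
    refine pvAInv_weaken m mp _ _ _ ?_ this
    rintro q (hq | ⟨c', hc', rfl⟩)
    · exact Or.inl (Or.inl hq)
    · rcases List.mem_cons.1 hc' with rfl | hc''
      · exact Or.inl (Or.inr rfl)
      · exact Or.inr ⟨c', hc'', rfl⟩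

theorem pvAAll (m : List (List Int)) (mp : Int) :
    ∀ (rl : List Nat) (done : Int × Int → Prop) (st : List (List Int) × PySem.Set (Int × Int)),
      (∀ r ∈ rl, r < m.length) → pvAInv m mp done st →
      pvAInv m mp
        (fun q => done q ∨ ∃ r ∈ rl, ∃ c ∈ List.range m.headI.length, q = ((c : Int), (r : Int)))
        (rl.foldl (fun st r =>
          (List.range m.headI.length).foldl
            (fun st c => pvABody m mp ((r : Nat) : Int) st ((c : Nat) : Int)) st) st) := by
  intro rl
  induction rl with
  | nil =>
    intro done st _ h
    refine pvAInv_weaken m mp done _ st ?_ h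
    rintro q (hq | ⟨r, hr, _⟩)
    · exact hq
    · simp at hr
  | cons r t ih =>
    intro done st hrl h
    have hr : ((r : Nat) : Int) < pvRowsZ m := by
      have := hrl r (List.mem_cons_self)
      unfold pvRowsZ
      omega
    have hrow := pvARow m mp (r : Int) ⟨by positivity, hr⟩ (List.range m.headI.length) done st
      (fun c hc => List.mem_range.1 hc) h
    have := ih (fun q => done q ∨ ∃ c ∈ List.range m.headI.length, q = ((c : Int), (r : Int)))
      _ (fun r' hr' => hrl r' (List.mem_cons_of_mem _ hr')) hrow
    refine pvAInv_weaken m mp _ _ _ ?_ this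
    rintro q (hq | ⟨r', hr', c', hc', rfl⟩)
    · exact Or.inl (Or.inl hq)
    · rcases List.mem_cons.1 hr' with rfl | hr''
      · exact Or.inl (Or.inr ⟨c', hc', rfl⟩)
      · exact Or.inr ⟨r', hr'', c', hc', rfl⟩

-- ---- the outer scan of B ----

def pvBInv (m : List (List Int)) (sizes : PySem.Dict (Int × Int) Int) : Prop :=
  ∀ k v, sizes.get? k = some v → pvOneB m k = true ∧ v = (pvCsize m k : Int)

theorem pvDict_get?_foldl_insert (comp : List (Int × Int)) (v : Int) :
    ∀ (dd : PySem.Dict (Int × Int) Int) (k : Int × Int),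
      ((comp.foldl (fun d q => d.insert q v) dd).get? k) =
        if k ∈ comp then some v else dd.get? k := by
  induction comp with
  | nil => intro dd k; simp
  | cons q t ih =>
    intro dd k
    simp only [List.foldl_cons, ih, PySem.Dict.get?_insert, List.mem_cons]
    by_cases h1 : k ∈ t <;> by_cases h2 : k = q <;> simp [h1, h2]

theorem pvOneB_of_cell_ne (m : List (List Int)) (q : Int × Int)
    (h : pvCell m q.1 q.2 ≠ 1) : pvOneB m q = false := by
  simp only [pvOneB, pvOne, Bool.and_eq_false_iff]
  right
  rw [beq_eq_false_iff_ne]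
  exact h

def pvBBody (m : List (List Int)) (mp : Int) (r : Int)
    (st2 : List Int × PySem.Dict (Int × Int) Int) (c : Int) :
    List Int × PySem.Dict (Int × Int) Int :=
  if pvCell m c r ≠ 1 then (st2.1 ++ [(0 : Int)], st2.2)
  else
    let sizes :=
      if st2.2.contains (c, r) then st2.2
      else
        let comp := pvSaturate m (pvColsZ m) (pvRowsZ m) (m.length * m.headI.length)
          (PySem.Set.ofList [(c, r)])
        comp.foldl (fun d q => d.insert q (comp.length : Int)) st2.2
    (st2.1 ++ [if mp ≤ sizes.getD (c, r) 0 then (1 : Int) else 0], sizes)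

def pvBRowStep (m : List (List Int)) (mp : Int)
    (st : List (List Int) × PySem.Dict (Int × Int) Int) (r : Nat) :
    List (List Int) × PySem.Dict (Int × Int) Int :=
  let inner := (List.range m.headI.length).foldl
    (fun st2 c => pvBBody m mp ((r : Nat) : Int) st2 ((c : Nat) : Int)) ([], st.2)
  (st.1 ++ [inner.1], inner.2)

theorem pvBStep (m : List (List Int)) (mp : Int) (r c : Int)
    (hc : 0 ≤ c ∧ c < pvColsZ m) (hr : 0 ≤ r ∧ r < pvRowsZ m)
    (st2 : List Int × PySem.Dict (Int × Int) Int) (h : pvBInv m st2.2) :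
    (pvBBody m mp r st2 c).1 =
      st2.1 ++ [if pvSpecP m mp (c, r) then (1 : Int) else 0] ∧
    pvBInv m (pvBBody m mp r st2 c).2 := by
  unfold pvBBody
  split
  · rename_i hcell
    have hone : pvOneB m (c, r) = false := pvOneB_of_cell_ne m (c, r) hcell
    have hspec : pvSpecP m mp (c, r) = false := by
      simp [pvSpecP, hone]
    rw [hspec]
    exact ⟨rfl, h⟩
  · rename_i hcell
    have hcell' : pvCell m c r = 1 := by simpa using hcell
    have hone : pvOneB m (c, r) = true := pvOneB_intro m hc.1 hc.2 hr.1 hr.2 hcell'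
    dsimp only
    split
    · rename_i hcont
      have hsome : ∃ v, st2.2.get? (c, r) = some v := by
        rw [PySem.Dict.contains_eq_isSome_get?] at hcont
        exact Option.isSome_iff_exists.1 hcont
      obtain ⟨v, hv⟩ := hsome
      obtain ⟨_, hveq⟩ := h (c, r) v hv
      constructor
      · have hgd : st2.2.getD (c, r) 0 = v := by
          rw [PySem.Dict.getD_eq_get?_getD, hv]
          rfl
        rw [hgd, hveq]
        simp [pvSpecP, hone]
      · exact h
    · rename_i hcont
      have hcompeq : pvSaturate m (pvColsZ m) (pvRowsZ m) (m.length * m.headI.length)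
          (PySem.Set.ofList [(c, r)]) = pvCompList m (c, r) := rfl
      rw [hcompeq]
      obtain ⟨hcnd, hcmem⟩ := pvCompList_spec m (c, r) hone
      have hget := pvDict_get?_foldl_insert (pvCompList m (c, r))
        ((pvCompList m (c, r)).length : Int) st2.2
      have hinv' : pvBInv m ((pvCompList m (c, r)).foldl
          (fun d q => d.insert q ((pvCompList m (c, r)).length : Int)) st2.2) := by
        intro k v hv
        rw [hget k] at hv
        split at hv
        · rename_i hk
          have hreach := (hcmem k).1 hk
          have hkone := pvReach_one m hone hreach
          have hksz : pvCsize m k = (pvCompList m (c, r)).length :=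
            pvCsize_congr m hone hreach
          refine ⟨hkone, ?_⟩
          cases hv
          rw [hksz]
        · exact h k v hv
      constructor
      · have hmemc : (c, r) ∈ pvCompList m (c, r) := (hcmem _).2 Relation.ReflTransGen.refl
        have hgd : ((pvCompList m (c, r)).foldl
            (fun d q => d.insert q ((pvCompList m (c, r)).length : Int)) st2.2).getD (c, r) 0 =
            ((pvCompList m (c, r)).length : Int) := by
          rw [PySem.Dict.getD_eq_get?_getD, hget (c, r), if_pos hmemc]
          rfl
        rw [hgd]
        have : pvCsize m (c, r) = (pvCompList m (c, r)).length := rfl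
        simp [pvSpecP, hone, this]
      · exact hinv'

theorem pvBRow (m : List (List Int)) (mp : Int) (r : Nat) (hr : r < m.length) :
    ∀ (cl : List Nat) (row : List Int) (sizes : PySem.Dict (Int × Int) Int),
      (∀ c ∈ cl, c < m.headI.length) → pvBInv m sizes →
      (cl.foldl (fun st2 c => pvBBody m mp ((r : Nat) : Int) st2 ((c : Nat) : Int))
        (row, sizes)).1 =
        row ++ cl.map (fun (c : Nat) => if pvSpecP m mp ((c : Int), (r : Int)) then (1 : Int) else 0) ∧
      pvBInv m (cl.foldl (fun st2 c => pvBBody m mp ((r : Nat) : Int) st2 ((c : Nat) : Int))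
        (row, sizes)).2 := by
  intro cl
  induction cl with
  | nil => intro row sizes _ h; exact ⟨by simp, h⟩
  | cons c t ih =>
    intro row sizes hcl h
    have hcb : ((c : Nat) : Int) < pvColsZ m := by
      have := hcl c (List.mem_cons_self)
      unfold pvColsZ; omega
    have hrb : ((r : Nat) : Int) < pvRowsZ m := by unfold pvRowsZ; omega
    obtain ⟨h1, h2⟩ := pvBStep m mp (r : Int) (c : Int) ⟨by positivity, hcb⟩
      ⟨by positivity, hrb⟩ (row, sizes) h
    simp only [List.foldl_cons]
    have hb : pvBBody m mp ((r : Nat) : Int) (row, sizes) ((c : Nat) : Int) =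
        ((pvBBody m mp (r : Int) (row, sizes) (c : Int)).1,
         (pvBBody m mp (r : Int) (row, sizes) (c : Int)).2) := rfl
    rw [hb, h1]
    obtain ⟨ih1, ih2⟩ := ih (row ++ [if pvSpecP m mp ((c : Int), (r : Int)) then (1 : Int) else 0])
      (pvBBody m mp (r : Int) (row, sizes) (c : Int)).2
      (fun c' hc' => hcl c' (List.mem_cons_of_mem _ hc')) h2
    refine ⟨?_, ih2⟩
    rw [ih1]
    simp

theorem pvBAll (m : List (List Int)) (mp : Int) :
    ∀ (rl : List Nat) (out : List (List Int)) (sizes : PySem.Dict (Int × Int) Int),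
      (∀ r ∈ rl, r < m.length) → pvBInv m sizes →
      (rl.foldl (pvBRowStep m mp) (out, sizes)).1 =
        out ++ rl.map (fun (r : Nat) =>
          (List.range m.headI.length).map
            (fun (c : Nat) => if pvSpecP m mp ((c : Int), (r : Int)) then (1 : Int) else 0)) ∧
      pvBInv m (rl.foldl (pvBRowStep m mp) (out, sizes)).2 := by
  intro rl
  induction rl with
  | nil => intro out sizes _ h; exact ⟨by simp, h⟩
  | cons r t ih =>
    intro out sizes hrl h
    obtain ⟨h1, h2⟩ := pvBRow m mp r (hrl r (List.mem_cons_self)) (List.range m.headI.length)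
      [] sizes (fun c hc => List.mem_range.1 hc) h
    simp only [List.foldl_cons]
    have hb : pvBRowStep m mp (out, sizes) r =
        (out ++ [((List.range m.headI.length).foldl
            (fun st2 c => pvBBody m mp ((r : Nat) : Int) st2 ((c : Nat) : Int)) ([], sizes)).1],
         ((List.range m.headI.length).foldl
            (fun st2 c => pvBBody m mp ((r : Nat) : Int) st2 ((c : Nat) : Int)) ([], sizes)).2) := rfl
    rw [hb, h1]
    obtain ⟨ih1, ih2⟩ := ih (out ++ [[] ++ (List.range m.headI.length).map
        (fun (c : Nat) => if pvSpecP m mp ((c : Int), (r : Int)) then (1 : Int) else 0)])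
      _ (fun r' hr' => hrl r' (List.mem_cons_of_mem _ hr')) h2
    refine ⟨?_, ih2⟩
    rw [ih1]
    simp

-- ---- putting the two sides together ----

theorem pvA_bridge (matrix : List (List Int)) (mp : Int) (hmp : ¬ mp ≤ 1) :
    remove_small_components_py matrix mp =
      ((List.range matrix.length).foldl
        (fun st r =>
          (List.range matrix.headI.length).foldl
            (fun st c => pvABody matrix mp ((r : Nat) : Int) st ((c : Nat) : Int)) st)
        ((List.range matrix.length).map (fun _ =>
          (List.range matrix.headI.length).map (fun _ => (0 : Int))), [])).1 := by
  simp only [remove_small_components_py, pvABody, if_neg hmp,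
    PySem.List.pyRange_zero_natCast, List.foldl_map]

theorem pvB_bridge (matrix : List (List Int)) (mp : Int) (hmp : ¬ mp ≤ 1) :
    remove_small_components_py_alt matrix mp =
      ((List.range matrix.length).foldl (pvBRowStep matrix mp) ([], PySem.Dict.empty)).1 := by
  simp only [remove_small_components_py_alt, if_neg hmp,
    PySem.List.pyRange_zero_natCast, List.foldl_map]
  rfl

theorem pvMain (matrix : List (List Int)) (mp : Int)
    (_hpre : Pre_remove_small_components_py matrix mp) :
    remove_small_components_py matrix mp = remove_small_components_py_alt matrix mp := by
  by_cases hmp : mp ≤ 1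
  · unfold remove_small_components_py remove_small_components_py_alt
    rw [if_pos hmp, if_pos hmp]
  · -- A computes the rendered grid of large components
    have h0 : pvAInv matrix mp (fun _ => False)
        (((List.range matrix.length).map (fun _ =>
          (List.range matrix.headI.length).map (fun _ => (0 : Int)))), []) := by
      refine ⟨List.nodup_nil, by simp, by simp, by simp, ?_⟩
      dsimp only
      unfold pvRender
      apply List.map_congr_left
      intro r _
      apply List.map_congr_left
      intro c _
      simp
    have hall := pvAAll matrix mp (List.range matrix.length) _ _
      (fun r hr => List.mem_range.1 hr) h0
    obtain ⟨hnd, hones, hcl, hdone, hrend⟩ := hall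
    have hA : remove_small_components_py matrix mp = pvRender matrix (pvSpecP matrix mp) := by
      rw [pvA_bridge matrix mp hmp, hrend]
      apply pvRender_congr
      intro x
      unfold pvSpecP
      by_cases hx : x ∈ ((List.range matrix.length).foldl
          (fun st r =>
            (List.range matrix.headI.length).foldl
              (fun st c => pvABody matrix mp ((r : Nat) : Int) st ((c : Nat) : Int)) st)
          ((List.range matrix.length).map (fun _ =>
            (List.range matrix.headI.length).map (fun _ => (0 : Int))), [])).2
      · rw [decide_eq_true hx, hones x hx]
      · rw [decide_eq_false hx]
        by_cases hox : pvOneB matrix x = true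
        · exfalso
          apply hx
          apply hdone x hox
          have hb := pvOneB_bounds matrix hox
          refine Or.inr ⟨x.2.toNat, ?_, x.1.toNat, ?_, ?_⟩
          · rw [List.mem_range]
            unfold pvRowsZ at hb
            omega
          · rw [List.mem_range]
            unfold pvColsZ at hb
            omega
          · rw [Prod.ext_iff]
            dsimp only
            constructor <;> omega
        · rw [Bool.not_eq_true] at hox
          rw [hox]
    -- B computes the same rendered grid
    have hBInv0 : pvBInv matrix (PySem.Dict.empty) := by
      intro k v hv
      simp [PySem.Dict.get?_empty] at hv
    obtain ⟨hB1, _⟩ := pvBAll matrix mp (List.range matrix.length) [] PySem.Dict.empty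
      (fun r hr => List.mem_range.1 hr) hBInv0
    have hB : remove_small_components_py_alt matrix mp = pvRender matrix (pvSpecP matrix mp) := by
      rw [pvB_bridge matrix mp hmp, hB1]
      unfold pvRender
      simp
    rw [hA, hB]

-- ===== VERDICT (by name: the statement is the Claim_ definition above) =====
theorem remove_small_components_py_spec : Claim_equal_remove_small_components_py := by
  intro matrix mp _dom hpre
  unfold Spec_remove_small_components_py
  exact pvMain matrix mp hpre
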